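-- pv_equiv track=rewrite | github.com/Ishaq-ML/ecg-cnn-fpga-deployment | Sim/Multiclass_Simulation/SCRIPTS/extract_golden.py | fmt_values
-- ===== SOURCE A (Python) =====
-- def fmt_values(values, label, indent=4):
--     """Format a list of values with a label and aligned columns (10 per row)."""
--     pad = ' ' * indent
--     lines = [f"{pad}{label} ({len(values)} values):"]
--     ROW = 10
--     for i in range(0, len(values), ROW):
--         chunk = values[i:i+ROW]
--         lines.append(pad + '  ' + ', '.join(f"{v:>8}" for v in chunk))
--     return '\n'.join(lines)
-- ===== SOURCE B (Python) =====
-- def fmt_values(values, label, indent=4):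
--     """Format a list of values with a label and aligned columns (10 per row)."""
--     pad = ' ' * indent
--     lines = [f"{pad}{label} ({len(values)} values):"]
--     buf = []
--     for v in values:
--         buf.append(f"{v:>8}")
--         if len(buf) == 10:
--             lines.append(pad + '  ' + ', '.join(buf))
--             buf = []
--     if buf:
--         lines.append(pad + '  ' + ', '.join(buf))
--     return '\n'.join(lines)
-- ===== Notes on version B (the rewrite author's own statement) =====
-- stated objective: alternative
-- what changed: Replaced the range/step index loop with slicing by a single element-by-element pass that accumulates a row buffer and flushes it every 10 entries (plus a final partial flush).
import Mathlib
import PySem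

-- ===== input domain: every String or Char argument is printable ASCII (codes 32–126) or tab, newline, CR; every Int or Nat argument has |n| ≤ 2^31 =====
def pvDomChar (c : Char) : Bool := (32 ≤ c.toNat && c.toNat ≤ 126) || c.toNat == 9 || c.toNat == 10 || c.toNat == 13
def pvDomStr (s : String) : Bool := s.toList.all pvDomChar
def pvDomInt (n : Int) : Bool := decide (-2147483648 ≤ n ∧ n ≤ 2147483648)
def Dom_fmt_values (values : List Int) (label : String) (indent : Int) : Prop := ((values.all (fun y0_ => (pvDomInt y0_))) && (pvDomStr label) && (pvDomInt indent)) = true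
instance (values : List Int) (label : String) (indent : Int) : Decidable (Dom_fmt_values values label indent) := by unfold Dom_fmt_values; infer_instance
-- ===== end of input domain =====

-- B replaces A's stride-10 index loop with slicing by a single element-wise pass that buffers
-- formatted entries and flushes a row every 10 (objective: alternative decomposition, same cost).

-- f"{v:>8}" : right-align str(v) in a field of width 8 (spaces on the left, no truncation)
def pvFmt8 (v : Int) : String :=
  let s := PySem.Int.toStr v
  String.mk (List.replicate (8 - s.toList.length) ' ') ++ s

-- pad + '  ' + ', '.join(row)  (the row-line expression both Pythons contain verbatim)
def pvRow (pad : String) (row : List String) : String :=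
  pad ++ "  " ++ PySem.Str.join ", " row

-- ===== PORT A =====
def fmt_values (values : List Int) (label : String) (indent : Int) : String :=
  let pad := String.mk (List.replicate indent.toNat ' ')
  let lines : List String := [pad ++ label ++ " (" ++ PySem.Int.toStr (values.length : Int) ++ " values):"]
  let lines := (PySem.List.pyRange 0 (values.length : Int) 10).foldl
      (fun ls i =>
        let chunk := PySem.List.slice values (some i) (some (i + 10))
        ls ++ [pvRow pad (chunk.map pvFmt8)]) lines
  PySem.Str.join "\n" lines

-- ===== PORT B =====
def fmt_values_alt (values : List Int) (label : String) (indent : Int) : String :=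
  let pad := String.mk (List.replicate indent.toNat ' ')
  let header := pad ++ label ++ " (" ++ PySem.Int.toStr (values.length : Int) ++ " values):"
  let st := values.foldl
      (fun (p : List String × List String) v =>
        let buf := p.2 ++ [pvFmt8 v]
        if buf.length == 10 then (p.1 ++ [pvRow pad buf], ([] : List String))
        else (p.1, buf)) ([header], [])
  let lines := if st.2.isEmpty then st.1 else st.1 ++ [pvRow pad st.2]
  PySem.Str.join "\n" lines

-- ===== PRECONDITION & SPEC =====
def Spec_fmt_values (values : List Int) (label : String) (indent : Int) (out : String) : Prop := out = fmt_values_alt values label indent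
instance (values : List Int) (label : String) (indent : Int) (out : String) : Decidable (Spec_fmt_values values label indent out) := by unfold Spec_fmt_values; infer_instance

-- ===== CLAIM (what is proved, stated in full; the proofs are below) =====
def Claim_equal_fmt_values : Prop := ∀ (values : List Int) (label : String) (indent : Int), Dom_fmt_values values label indent → Spec_fmt_values values label indent (fmt_values values label indent)

-- ===== LEMMAS AND PROOFS =====

-- the common mathematical shape: successive 10-element chunks of a list
def chunks10 {α : Type} : List α → List (List α)
  | [] => []
  | a :: t => ((a :: t).take 10) :: chunks10 ((a :: t).drop 10)
  termination_by l => l.length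
  decreasing_by simp

@[simp] theorem chunks10_nil {α : Type} : chunks10 ([] : List α) = [] := by
  rw [chunks10.eq_def]

theorem chunks10_cons {α : Type} (a : α) (t : List α) :
    chunks10 (a :: t) = ((a :: t).take 10) :: chunks10 ((a :: t).drop 10) := by
  rw [chunks10.eq_def]

theorem chunks10_map {α β : Type} (f : α → β) (l : List α) :
    chunks10 (l.map f) = (chunks10 l).map (List.map f) := by
  induction l using chunks10.induct with
  | case1 => simp
  | case2 a t ih =>
    rw [List.map_cons, chunks10_cons, chunks10_cons, List.map_cons]
    congr 1
    · simp
    · rw [← ih]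
      congr 1
      simp

theorem chunks10_append10 {α : Type} (xs ys : List α) (h : xs.length = 10) :
    chunks10 (xs ++ ys) = xs :: chunks10 ys := by
  cases xs with
  | nil => simp at h
  | cons a t =>
    rw [List.cons_append, chunks10_cons, ← List.cons_append]
    congr 1
    · rw [List.take_append_of_le_length (by omega)]
      exact List.take_of_length_le (by omega)
    · rw [List.drop_append_of_le_length (by omega)]
      have hd : (a :: t).drop 10 = [] := List.drop_eq_nil_of_le (by omega)
      rw [hd, List.nil_append]

theorem chunks10_short {α : Type} (l : List α) (h0 : l ≠ []) (h : l.length < 10) :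
    chunks10 l = [l] := by
  cases l with
  | nil => exact absurd rfl h0
  | cons a t =>
    rw [chunks10_cons,
        List.take_of_length_le (by simp at h ⊢; omega),
        List.drop_eq_nil_of_le (by simp at h ⊢; omega)]
    simp

theorem chunk_range {α : Type} (l : List α) :
    (List.range ((l.length + 9) / 10)).map (fun k => (l.drop (10 * k)).take 10) = chunks10 l := by
  induction l using chunks10.induct with
  | case1 => simp
  | case2 a t ih =>
    have hm : ((a :: t).length + 9) / 10 = ((t.length - 9) + 9) / 10 + 1 := by
      simp; omega
    rw [hm, List.range_succ_eq_map, List.map_cons, chunks10_cons]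
    simp only [List.drop_succ_cons, List.length_drop] at ih
    congr 1
    simp only [List.drop_succ_cons, List.map_map]
    rw [← ih]
    apply List.map_congr_left
    intro k _
    simp only [Function.comp_apply]
    rw [List.drop_drop,
        show 10 * (k + 1) = (10 * k + 9) + 1 from by ring,
        List.drop_succ_cons]
    congr 2
    omega

-- A's loop over range(0, len, 10) with slices produces exactly the chunk rows
theorem afold (pad : String) (l : List Int) (lines : List String) :
    (PySem.List.pyRange 0 (l.length : Int) 10).foldl
        (fun ls i => ls ++ [pvRow pad ((PySem.List.slice l (some i) (some (i + 10))).map pvFmt8)]) lines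
      = lines ++ (chunks10 l).map (fun c => pvRow pad (c.map pvFmt8)) := by
  rw [PySem.List.pyRange_of_pos 0 (l.length : Int) (by norm_num)]
  have hc : (if (0 : Int) < (l.length : Int) then (((l.length : Int) - 0 + 10 - 1) / 10).toNat else 0)
      = (l.length + 9) / 10 := by
    split <;> omega
  rw [hc, List.foldl_map, PySem.List.foldl_append_singleton_eq_map]
  congr 1
  rw [← chunk_range, List.map_map]
  apply List.map_congr_left
  intro k _
  simp only [Function.comp]
  have h0 : (0 : Int) + 10 * (k : Int) = ((10 * k : Nat) : Int) := by push_cast; ring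
  rw [h0]
  have h10 : ((10 * k : Nat) : Int) + 10 = ((10 * k : Nat) : Int) + ((10 : Nat) : Int) := by norm_num
  rw [h10, PySem.List.slice_natCast_add]

-- B's buffer-and-flush pass, with any partially filled buffer, produces the chunk rows of
-- the buffered strings followed by the remaining formatted values
theorem bfold (pad : String) (l : List Int) (lines buf : List String) (h : buf.length < 10) :
    (let st := l.foldl
        (fun (p : List String × List String) v =>
          let b := p.2 ++ [pvFmt8 v]
          if b.length == 10 then (p.1 ++ [pvRow pad b], ([] : List String))
          else (p.1, b)) (lines, buf)
     if st.2.isEmpty then st.1 else st.1 ++ [pvRow pad st.2])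
      = lines ++ (chunks10 (buf ++ l.map pvFmt8)).map (pvRow pad) := by
  induction l generalizing lines buf with
  | nil =>
    simp only [List.foldl_nil, List.map_nil, List.append_nil]
    cases buf with
    | nil => simp
    | cons b bs =>
      rw [chunks10_short _ (by simp) h]
      simp
  | cons v t ih =>
    simp only [List.foldl_cons]
    by_cases hb : (buf ++ [pvFmt8 v]).length = 10
    · simp only [hb, beq_self_eq_true, if_true]
      rw [ih _ [] (by norm_num)]
      have ha : buf ++ (v :: t).map pvFmt8 = (buf ++ [pvFmt8 v]) ++ t.map pvFmt8 := by simp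
      rw [ha, chunks10_append10 _ _ hb]
      simp
    · have hb' : ((buf ++ [pvFmt8 v]).length == 10) = false := by
        simp only [beq_eq_false_iff_ne, ne_eq]; exact hb
      simp only [hb', Bool.false_eq_true, if_false]
      rw [ih _ _ (by simp only [List.length_append, List.length_cons, List.length_nil] at hb ⊢; omega)]
      simp

-- ===== VERDICT (by name: the statement is the Claim_ definition above) =====
theorem fmt_values_spec : Claim_equal_fmt_values := by
  intro values label indent _
  unfold Spec_fmt_values fmt_values fmt_values_alt
  simp only []
  rw [afold, bfold _ _ _ _ (by norm_num)]
  rw [List.nil_append, chunks10_map, List.map_map]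
  rfl
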